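-- pv_equiv track=rewrite | github.com/naveenv92/project-euler | python/problem-049.py | isPerm
-- ===== SOURCE A (Python) =====
-- def isPerm(a: int, b: int) -> bool:
-- 	digits = list()
-- 	for i in str(a):
-- 		digits.append(i)
-- 	for j in str(b):
-- 		if j in digits:
-- 			digits.remove(j)
-- 	return len(digits) == 0
-- ===== SOURCE B (Python) =====
-- from collections import Counter
--
-- def isPerm(a: int, b: int) -> bool:
--     # A's loop is a sub-multiset test: every digit/char of str(a) must occur
--     # at least as often in str(b).  Counter subtraction drops non-positive
--     # counts, so an empty difference means exactly that.
--     return not (Counter(str(a)) - Counter(str(b)))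
-- ===== Notes on version B (the rewrite author's own statement) =====
-- stated objective: idiomatic
-- what changed: Replaces the append-then-remove list loops with one Counter subtraction: build frequency tables of the two strings and test whether Counter(str(a)) - Counter(str(b)) is empty, preserving A's asymmetric sub-multiset semantics.
import Mathlib
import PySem

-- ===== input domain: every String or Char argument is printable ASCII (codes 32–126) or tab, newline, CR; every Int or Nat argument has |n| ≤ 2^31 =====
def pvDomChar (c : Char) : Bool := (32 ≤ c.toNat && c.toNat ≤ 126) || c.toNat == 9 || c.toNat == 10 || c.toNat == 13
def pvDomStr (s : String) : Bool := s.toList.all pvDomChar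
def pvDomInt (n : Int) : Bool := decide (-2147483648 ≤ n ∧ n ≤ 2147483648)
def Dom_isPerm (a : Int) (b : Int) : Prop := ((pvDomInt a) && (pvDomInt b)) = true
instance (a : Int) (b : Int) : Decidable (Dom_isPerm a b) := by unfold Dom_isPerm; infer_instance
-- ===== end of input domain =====

-- B replaces A's append/membership/remove list loops with one Counter subtraction
-- (frequency tables compared with ≤), keeping A's asymmetric sub-multiset semantics.

-- ===== PORT A =====
-- digits = []; for i in str(a): digits.append(i); for j in str(b): if j in digits: digits.remove(j); return len(digits) == 0
def isPerm (a : Int) (b : Int) : Bool :=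
  let digits : List Char := (PySem.Int.toChars a).foldl (fun ds i => ds ++ [i]) []
  let digits : List Char := (PySem.Int.toChars b).foldl
    (fun ds j => if j ∈ ds then (PySem.List.remove? ds j).getD ds else ds) digits
  decide (digits.length = 0)

-- ===== PORT B =====
-- return not (Counter(str(a)) - Counter(str(b))): the Counter difference is empty
-- iff every key of Counter(str(a)) has count ≤ its count in Counter(str(b)).
def isPerm_alt (a : Int) (b : Int) : Bool :=
  let ca := PySem.Dict.counter (PySem.Int.toChars a)
  let cb := PySem.Dict.counter (PySem.Int.toChars b)
  ca.items.all (fun kv => kv.2 ≤ cb.getD kv.1 0)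

-- ===== PRECONDITION & SPEC =====
def Spec_isPerm (a : Int) (b : Int) (out : Bool) : Prop := out = isPerm_alt a b
instance (a : Int) (b : Int) (out : Bool) : Decidable (Spec_isPerm a b out) := by unfold Spec_isPerm; infer_instance

-- ===== CLAIM (what is proved, stated in full; the proofs are below) =====
def Claim_equal_isPerm : Prop := ∀ (a : Int) (b : Int), Dom_isPerm a b → Spec_isPerm a b (isPerm a b)

-- ===== LEMMAS AND PROOFS =====

-- A's first loop just copies the characters.
theorem foldl_append_id (l acc : List Char) :
    l.foldl (fun ds i => ds ++ [i]) acc = acc ++ l := by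
  induction l generalizing acc with
  | nil => simp
  | cons x xs ih => simp [List.foldl, ih]

-- A's second loop is exactly List.diff.
theorem foldl_remove_eq_diff (lb la : List Char) :
    lb.foldl (fun ds j => if j ∈ ds then (PySem.List.remove? ds j).getD ds else ds) la
      = la.diff lb := by
  induction lb generalizing la with
  | nil => simp
  | cons j lb ih =>
    simp only [List.foldl, List.diff_cons]
    by_cases h : j ∈ la
    · rw [if_pos h, PySem.List.remove?_eq_some_erase la j h, Option.getD_some, ih]
    · rw [if_neg h, List.erase_of_not_mem h, ih]

-- The diff is empty iff every count in la is ≤ the count in lb.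
theorem diff_eq_nil_iff_counts (la lb : List Char) :
    la.diff lb = [] ↔ ∀ c ∈ la, la.count c ≤ lb.count c := by
  constructor
  · intro h c hc
    have := List.count_diff c la lb
    rw [h] at this
    simp only [List.count_nil] at this
    omega
  · intro h
    rw [List.eq_nil_iff_forall_not_mem]
    intro c hc
    have hmem : c ∈ la := (List.diff_subset la lb) hc
    have hcount : (la.diff lb).count c = la.count c - lb.count c := List.count_diff c la lb
    have hzero : la.count c - lb.count c = 0 := by
      have := h c hmem; omega
    have : (la.diff lb).count c = 0 := by rw [hcount, hzero]
    exact (List.count_eq_zero.mp this) hc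

theorem isPerm_iff (a b : Int) :
    isPerm a b = true ↔ ∀ c ∈ PySem.Int.toChars a,
      (PySem.Int.toChars a).count c ≤ (PySem.Int.toChars b).count c := by
  simp only [isPerm]
  rw [foldl_append_id, List.nil_append, foldl_remove_eq_diff,
    decide_eq_true_eq, List.length_eq_zero_iff]
  exact diff_eq_nil_iff_counts _ _

theorem isPerm_alt_iff (a b : Int) :
    isPerm_alt a b = true ↔ ∀ c ∈ PySem.Int.toChars a,
      (PySem.Int.toChars a).count c ≤ (PySem.Int.toChars b).count c := by
  simp only [isPerm_alt, PySem.Dict.items_counter, PySem.Dict.getD_counter, List.all_map,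
    List.all_eq_true, Function.comp, decide_eq_true_eq, Nat.cast_le]
  constructor
  · intro h c hc
    exact h c ((PySem.Set.mem_ofList _ _).mpr hc)
  · intro h c hc
    exact h c ((PySem.Set.mem_ofList _ _).mp hc)

-- ===== VERDICT (by name: the statement is the Claim_ definition above) =====
theorem isPerm_spec : Claim_equal_isPerm := by
  intro a b _
  unfold Spec_isPerm
  rw [Bool.eq_iff_iff, isPerm_iff, isPerm_alt_iff]
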